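-- pv_equiv track=rewrite | github.com/causify-ai/helpers | helpers/hmarkdown_div_blocks.py | _split_lines_into_chunks
-- ===== SOURCE A (Python) =====
-- from typing import List, Tuple
--
-- def _split_lines_into_chunks(
--     lines: List[str],
-- ) -> List[Tuple[bool, List[str]]]:
--     """
--     Split lines into chunks of div blocks and non-div blocks.
--
--     A div block starts with a line containing ::: and ends with another
--     line containing :::.
--
--     :param lines: List of strings representing lines in a markdown file.
--     :return: List of tuples (is_div_block, chunk_lines) where is_div_block
--         indicates if the chunk is a div block.
--     """
--     chunks = []
--     i = 0
--     while i < len(lines):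
--         line = lines[i]
--         # Check if this line starts a div block.
--         if line.strip().startswith(":::"):
--             # Look ahead to find the closing div block.
--             j = i + 1
--             while j < len(lines):
--                 if lines[j].strip().startswith(":::"):
--                     # Found the end of the div block.
--                     chunk_lines = lines[i : j + 1]
--                     chunks.append((True, chunk_lines))
--                     i = j + 1
--                     break
--                 j += 1
--             else:
--                 # No closing div block found, treat as regular line.
--                 chunks.append((False, [line]))
--                 i += 1
--         else:
--             # Start a non-div block chunk.
--             chunk_lines = [line]
--             i += 1
--             # Continue collecting non-div lines.
--             while i < len(lines) and not lines[i].strip().startswith(":::"):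
--                 chunk_lines.append(lines[i])
--                 i += 1
--             chunks.append((False, chunk_lines))
--     return chunks
-- ===== SOURCE B (Python) =====
-- from typing import List, Tuple
--
-- def _split_lines_into_chunks(
--     lines: List[str],
-- ) -> List[Tuple[bool, List[str]]]:
--     """Single-pass state machine: accumulate either a pending non-div buffer
--     or an open div buffer, flushing chunks as markers are seen."""
--     def is_marker(s: str) -> bool:
--         return s.strip().startswith(":::")
--
--     chunks: List[Tuple[bool, List[str]]] = []
--     buf: List[str] = []      # pending non-div lines
--     div = None               # open (unclosed) div block lines, or None
--     for line in lines:
--         if div is not None: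
--             div.append(line)
--             if is_marker(line):
--                 chunks.append((True, div))
--                 div = None
--         elif is_marker(line):
--             if buf:
--                 chunks.append((False, buf))
--                 buf = []
--             div = [line]
--         else:
--             buf.append(line)
--     if div is not None:
--         # Unclosed div: its opening marker is a lone regular line, the rest
--         # (if any) form one non-div chunk.
--         chunks.append((False, div[:1]))
--         if len(div) > 1:
--             chunks.append((False, div[1:]))
--     elif buf:
--         chunks.append((False, buf))
--     return chunks
-- ===== Notes on version B (the rewrite author's own statement) =====
-- stated objective: alternative
-- what changed: Replaces A's cursor-with-lookahead loop (inner scan for the closing marker plus slicing) by a single left-to-right pass with an explicit state machine (pending text buffer / open div buffer) flushed at markers and at the end.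
import Mathlib
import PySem

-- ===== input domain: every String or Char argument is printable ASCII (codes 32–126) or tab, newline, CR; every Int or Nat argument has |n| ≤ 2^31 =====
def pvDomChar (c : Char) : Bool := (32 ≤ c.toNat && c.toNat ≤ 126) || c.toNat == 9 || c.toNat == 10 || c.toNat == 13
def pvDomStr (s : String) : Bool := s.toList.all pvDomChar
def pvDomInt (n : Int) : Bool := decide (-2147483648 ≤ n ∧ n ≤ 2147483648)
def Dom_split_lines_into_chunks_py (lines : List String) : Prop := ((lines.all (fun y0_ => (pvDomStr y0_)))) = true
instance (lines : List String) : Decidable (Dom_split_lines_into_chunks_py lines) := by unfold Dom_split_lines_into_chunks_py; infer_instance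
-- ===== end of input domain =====

-- B replaces A's cursor-with-lookahead scan by a single-pass state machine (alternative
-- decomposition, same cost); both programs are pure (no argument mutation).

-- line.strip().startswith(":::")
def pvIsMarker (s : String) : Bool := PySem.Str.startswith (PySem.Str.strip s) ":::"

-- ===== PORT A =====
-- A's inner look-ahead while loop (find the first closing marker): returns the lines
-- up to and including the closing marker, and the remaining suffix; none = not found.
def pvScanClose : List String → Option (List String × List String)
  | [] => none
  | x :: xs =>
    if pvIsMarker x then some ([x], xs)
    else
      match pvScanClose xs with
      | none => none
      | some (p, s) => some (x :: p, s)

-- A's inner non-div while loop: collect lines while not a marker.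
def pvSpanNon : List String → List String × List String
  | [] => ([], [])
  | x :: xs =>
    if pvIsMarker x then ([], x :: xs)
    else (x :: (pvSpanNon xs).1, (pvSpanNon xs).2)

theorem pvScanClose_len : ∀ {l p s : List String}, pvScanClose l = some (p, s) → s.length ≤ l.length := by
  intro l
  induction l with
  | nil => intro p s h; simp [pvScanClose] at h
  | cons x xs ih =>
    intro p s h
    simp only [pvScanClose] at h
    by_cases hm : pvIsMarker x = true
    · simp [hm] at h
      obtain ⟨_, h2⟩ := h
      subst h2; simp
    · simp [hm] at h
      cases hsc : pvScanClose xs with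
      | none => rw [hsc] at h; simp at h
      | some ps =>
        rw [hsc] at h
        obtain ⟨p', s'⟩ := ps
        simp at h
        obtain ⟨_, h2⟩ := h
        subst h2
        exact Nat.le_succ_of_le (ih hsc)

theorem pvSpanNon_len : ∀ (l : List String), (pvSpanNon l).2.length ≤ l.length := by
  intro l
  induction l with
  | nil => simp [pvSpanNon]
  | cons x xs ih =>
    simp only [pvSpanNon]
    by_cases hm : pvIsMarker x = true
    · simp [hm]
    · simp [hm]
      exact Nat.le_succ_of_le ih

-- Transliteration of A: the outer while loop is recursion on the remaining suffix;
-- the two inner while loops are pvScanClose / pvSpanNon above.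
def split_lines_into_chunks_py : List String → List (Bool × List String)
  | [] => []
  | line :: rest =>
    if pvIsMarker line then
      match h : pvScanClose rest with
      | some (p, s) => (true, line :: p) :: split_lines_into_chunks_py s
      | none => (false, [line]) :: split_lines_into_chunks_py rest
    else
      (false, line :: (pvSpanNon rest).1) :: split_lines_into_chunks_py (pvSpanNon rest).2
termination_by l => l.length
decreasing_by
  · exact Nat.lt_succ_of_le (pvScanClose_len h)
  · exact Nat.lt_succ_of_le (Nat.le_refl _)
  · exact Nat.lt_succ_of_le (pvSpanNon_len rest)

-- ===== PORT B =====
-- State: (chunks so far, pending non-div buffer, open div buffer or none).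
def pvStep (st : List (Bool × List String) × List String × Option (List String)) (line : String) :
    List (Bool × List String) × List String × Option (List String) :=
  match st with
  | (chunks, buf, some d) =>
    if pvIsMarker line then (chunks ++ [(true, d ++ [line])], buf, none)
    else (chunks, buf, some (d ++ [line]))
  | (chunks, buf, none) =>
    if pvIsMarker line then
      ((if buf.isEmpty then chunks else chunks ++ [(false, buf)]), [], some [line])
    else (chunks, buf ++ [line], none)

-- End-of-input flush (d is never empty; take 1/drop 1 are exactly div[:1]/div[1:] there).
def pvFinish (st : List (Bool × List String) × List String × Option (List String)) :
    List (Bool × List String) :=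
  match st with
  | (chunks, _, some d) =>
    chunks ++ (false, d.take 1) :: (if d.length > 1 then [(false, d.drop 1)] else [])
  | (chunks, buf, none) => if buf.isEmpty then chunks else chunks ++ [(false, buf)]

def split_lines_into_chunks_py_alt (lines : List String) : List (Bool × List String) :=
  pvFinish (lines.foldl pvStep ([], [], none))

-- ===== PRECONDITION & SPEC =====
def Spec_split_lines_into_chunks_py (lines : List String) (out : List (Bool × List String)) : Prop := out = split_lines_into_chunks_py_alt lines
instance (lines : List String) (out : List (Bool × List String)) : Decidable (Spec_split_lines_into_chunks_py lines out) := by unfold Spec_split_lines_into_chunks_py; infer_instance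

-- ===== CLAIM (what is proved, stated in full; the proofs are below) =====
def Claim_equal_split_lines_into_chunks_py : Prop := ∀ (lines : List String), Dom_split_lines_into_chunks_py lines → Spec_split_lines_into_chunks_py lines (split_lines_into_chunks_py lines)

-- ===== LEMMAS AND PROOFS =====

-- A marker-free block of lines just accumulates into the pending buffer.
theorem pvFold_free_none : ∀ (l : List String) chunks (buf : List String),
    (∀ x ∈ l, pvIsMarker x = false) →
    List.foldl pvStep (chunks, buf, none) l = (chunks, buf ++ l, none) := by
  intro l
  induction l with
  | nil => intro chunks buf _; simp
  | cons x xs ih =>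
    intro chunks buf hfree
    have hx : pvIsMarker x = false := hfree x (by simp)
    simp only [List.foldl_cons, pvStep, hx, Bool.false_eq_true, if_false]
    rw [ih _ _ (fun y hy => hfree y (by simp [hy]))]
    simp

-- A marker-free block of lines just accumulates into the open div buffer.
theorem pvFold_free_some : ∀ (l : List String) chunks (buf d : List String),
    (∀ x ∈ l, pvIsMarker x = false) →
    List.foldl pvStep (chunks, buf, some d) l = (chunks, buf, some (d ++ l)) := by
  intro l
  induction l with
  | nil => intro chunks buf d _; simp
  | cons x xs ih =>
    intro chunks buf d hfree
    have hx : pvIsMarker x = false := hfree x (by simp)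
    simp only [List.foldl_cons, pvStep, hx, Bool.false_eq_true, if_false]
    rw [ih _ _ _ (fun y hy => hfree y (by simp [hy]))]
    simp

-- Characterisation of A's closing-marker scan.
theorem pvScanClose_some : ∀ {l p s : List String}, pvScanClose l = some (p, s) →
    ∃ p' c, p = p' ++ [c] ∧ l = p ++ s ∧ (∀ x ∈ p', pvIsMarker x = false) ∧ pvIsMarker c = true := by
  intro l
  induction l with
  | nil => intro p s h; simp [pvScanClose] at h
  | cons x xs ih =>
    intro p s h
    simp only [pvScanClose] at h
    by_cases hm : pvIsMarker x = true
    · simp [hm] at h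
      obtain ⟨h1, h2⟩ := h
      exact ⟨[], x, by simp [h1.symm], by simp [h1.symm, h2.symm], by simp, hm⟩
    · simp [hm] at h
      cases hsc : pvScanClose xs with
      | none => rw [hsc] at h; simp at h
      | some ps =>
        rw [hsc] at h
        obtain ⟨p0, s0⟩ := ps
        simp at h
        obtain ⟨h1, h2⟩ := h
        obtain ⟨p', c, e1, e2, hfree, hc⟩ := ih hsc
        refine ⟨x :: p', c, ?_, ?_, ?_, hc⟩
        · simp [h1.symm, e1]
        · simp [h1.symm, h2.symm, e2]
        · intro y hy
          rcases List.mem_cons.mp hy with h | h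
          · subst h; simpa using hm
          · exact hfree y h

theorem pvScanClose_none : ∀ {l : List String}, pvScanClose l = none →
    ∀ x ∈ l, pvIsMarker x = false := by
  intro l
  induction l with
  | nil => intro _ x hx; simp at hx
  | cons x xs ih =>
    intro h y hy
    simp only [pvScanClose] at h
    by_cases hm : pvIsMarker x = true
    · simp [hm] at h
    · cases hsc : pvScanClose xs with
      | none =>
        rcases List.mem_cons.mp hy with h' | h'
        · subst h'; simpa using hm
        · exact ih hsc y h'
      | some ps => rw [if_neg (by simp [hm]), hsc] at h; obtain ⟨_, _⟩ := ps; simp at h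

-- Characterisation of A's non-div span.
theorem pvSpanNon_spec : ∀ (l : List String),
    l = (pvSpanNon l).1 ++ (pvSpanNon l).2 ∧ (∀ x ∈ (pvSpanNon l).1, pvIsMarker x = false) ∧
    ((pvSpanNon l).2 = [] ∨ ∃ m s', (pvSpanNon l).2 = m :: s' ∧ pvIsMarker m = true) := by
  intro l
  induction l with
  | nil => simp [pvSpanNon]
  | cons x xs ih =>
    obtain ⟨e, hfree, hhead⟩ := ih
    by_cases hm : pvIsMarker x = true
    · refine ⟨by simp [pvSpanNon, hm], by simp [pvSpanNon, hm], ?_⟩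
      right; exact ⟨x, xs, by simp [pvSpanNon, hm], hm⟩
    · simp only [pvSpanNon, if_neg hm]
      refine ⟨by simpa using e, ?_, by simpa using hhead⟩
      intro y hy
      simp at hy
      rcases hy with h | h
      · subst h; simpa using hm
      · exact hfree y h

theorem pvSpanNon_free : ∀ (l : List String), (∀ x ∈ l, pvIsMarker x = false) →
    pvSpanNon l = (l, []) := by
  intro l
  induction l with
  | nil => intro _; simp [pvSpanNon]
  | cons x xs ih =>
    intro hfree
    have hx : pvIsMarker x = false := hfree x (by simp)
    rw [pvSpanNon]
    rw [ih (fun y hy => hfree y (by simp [hy]))]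
    simp [hx]

-- A on a marker-free list: empty or one non-div chunk.
theorem pvA_free : ∀ (l : List String), (∀ x ∈ l, pvIsMarker x = false) →
    split_lines_into_chunks_py l = if l.isEmpty then [] else [(false, l)] := by
  intro l hfree
  cases l with
  | nil => simp [split_lines_into_chunks_py]
  | cons x xs =>
    have hx : pvIsMarker x = false := hfree x (by simp)
    rw [split_lines_into_chunks_py]
    rw [if_neg (by simp [hx])]
    rw [pvSpanNon_free xs (fun y hy => hfree y (by simp [hy]))]
    simp [split_lines_into_chunks_py]

-- Main invariant: finishing B's fold from a text-state prefix yields the prefix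
-- chunks followed by A's result on the remaining lines.
theorem pvMain : ∀ (n : Nat) (lines : List String), lines.length ≤ n → ∀ chunks,
    pvFinish (List.foldl pvStep (chunks, [], none) lines) = chunks ++ split_lines_into_chunks_py lines := by
  intro n
  induction n with
  | zero =>
    intro lines hlen chunks
    have : lines = [] := List.eq_nil_of_length_eq_zero (Nat.le_zero.mp hlen)
    subst this
    simp [pvFinish, split_lines_into_chunks_py]
  | succ n ih =>
    intro lines hlen chunks
    cases lines with
    | nil => simp [pvFinish, split_lines_into_chunks_py]
    | cons line rest =>
      have hrest : rest.length ≤ n := by simpa using hlen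
      by_cases hm : pvIsMarker line = true
      · cases hsc : pvScanClose rest with
        | some ps =>
          obtain ⟨p, s⟩ := ps
          obtain ⟨p', c, ep, el, hfree, hc⟩ := pvScanClose_some hsc
          have hs : s.length ≤ n := by
            have : rest.length = p.length + s.length := by rw [el]; simp
            omega
          rw [split_lines_into_chunks_py]
          rw [if_pos hm, hsc]
          simp only [List.foldl_cons, pvStep, hm, reduceIte, List.isEmpty_nil]
          rw [el, ep]
          rw [show (p' ++ [c]) ++ s = p' ++ (c :: s) by simp]
          rw [List.foldl_append]
          rw [pvFold_free_some p' _ _ _ hfree]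
          simp only [List.foldl_cons, pvStep, hc, reduceIte]
          rw [ih s hs]
          simp
        | none =>
          have hfree := pvScanClose_none hsc
          rw [split_lines_into_chunks_py]
          rw [if_pos hm, hsc]
          simp only [List.foldl_cons, pvStep, hm, reduceIte, List.isEmpty_nil]
          rw [pvFold_free_some rest _ _ _ hfree]
          rw [pvA_free rest hfree]
          cases rest with
          | nil => simp [pvFinish]
          | cons r rs => simp [pvFinish]
      · have hm' : pvIsMarker line = false := by simpa using hm
        rcases hsn : pvSpanNon rest with ⟨run, sp⟩
        obtain ⟨e, hfree, hhead⟩ := pvSpanNon_spec rest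
        rw [hsn] at e hfree hhead
        rw [split_lines_into_chunks_py]
        rw [if_neg (by simp [hm']), hsn]
        simp only [List.foldl_cons, pvStep, hm', Bool.false_eq_true, if_false]
        rw [e, List.foldl_append, pvFold_free_none _ _ _ hfree]
        rcases hhead with hnil | ⟨m, s', hs, hmk⟩
        · subst hnil
          simp [pvFinish, split_lines_into_chunks_py]
        · subst hs
          have hlen' : (m :: s').length ≤ n := by
            have := pvSpanNon_len rest
            rw [hsn] at this
            simp at this ⊢
            omega
          simp only [List.foldl_cons, pvStep, hmk, List.nil_append, List.singleton_append, List.isEmpty_cons, Bool.false_eq_true, if_false, reduceIte]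
          have hstep : List.foldl pvStep (chunks ++ [(false, line :: run)], [], some [m]) s' =
              List.foldl pvStep (chunks ++ [(false, line :: run)], [], none) (m :: s') := by
            simp only [List.foldl_cons, pvStep, hmk, List.isEmpty_nil, reduceIte]
          rw [hstep, ih (m :: s') hlen']
          simp

-- ===== VERDICT (by name: the statement is the Claim_ definition above) =====
theorem split_lines_into_chunks_py_spec : Claim_equal_split_lines_into_chunks_py := by
  intro lines _
  unfold Spec_split_lines_into_chunks_py split_lines_into_chunks_py_alt
  rw [pvMain lines.length lines (Nat.le_refl _) []]
  simp
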